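-- pv_equiv track=rewrite | github.com/benquick123/code-profiling | code/batch-2/dn5 - tviti/M-17174-2067.py | custva
-- ===== SOURCE A (Python) =====
-- def custva(tviti, hashtagi):
--     o=[]
--     for x in tviti:
--         for z in hashtagi:
--             if "#"+z in x:
--                 for y in range(0, len(x)):
--                     if x[y] == ":":
--                         if x[:y] not in o:
--                             o.append(x[:y])
--     o = sorted(o)
--     return o
-- ===== SOURCE B (Python) =====
-- def custva(tviti, hashtagi):
--     acc = set()
--     for x in tviti:
--         if any("#" + z in x for z in hashtagi):
--             parts = x.split(":")
--             for i in range(1, len(parts)):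
--                 acc.add(":".join(parts[:i]))
--     return sorted(acc)
-- ===== Notes on version B (the rewrite author's own statement) =====
-- stated objective: simpler
-- what changed: B replaces A's nested hashtag loop and per-character index scan (with an O(|o|) membership test before each append) by a single any() hashtag test per tweet, a split(':') with cumulative ':'.join prefixes, and a dedup set, then sorts the set.
import Mathlib
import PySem

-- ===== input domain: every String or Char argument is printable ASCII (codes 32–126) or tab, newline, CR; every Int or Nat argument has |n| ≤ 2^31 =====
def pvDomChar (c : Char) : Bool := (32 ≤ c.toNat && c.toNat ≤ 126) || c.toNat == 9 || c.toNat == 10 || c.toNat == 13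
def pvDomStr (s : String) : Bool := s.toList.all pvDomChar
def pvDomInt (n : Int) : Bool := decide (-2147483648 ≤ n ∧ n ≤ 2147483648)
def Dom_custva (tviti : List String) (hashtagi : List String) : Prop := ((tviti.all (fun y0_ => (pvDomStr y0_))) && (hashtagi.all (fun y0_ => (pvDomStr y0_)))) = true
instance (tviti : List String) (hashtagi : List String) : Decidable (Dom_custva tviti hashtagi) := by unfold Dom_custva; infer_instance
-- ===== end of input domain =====

-- B replaces A's quadruple scan (every hashtag × every character index, with an O(|o|)
-- membership test per append) by one `any` test per tweet, a split on ':' with cumulative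
-- joins, and a dedup set; objective: simpler/idiomatic.

-- ===== PORT A =====
def custva (tviti : List String) (hashtagi : List String) : List String :=
  let o : List String := tviti.foldl (fun o x =>
    hashtagi.foldl (fun o z =>
      if PySem.Str.isIn ("#" ++ z) x then
        (PySem.List.pyRange 0 (PySem.Str.len x)).foldl (fun o y =>
          if PySem.Str.pyGet? x y = some ':' then
            (if PySem.Str.slice x none (some y) ∈ o then o
             else o ++ [PySem.Str.slice x none (some y)])
          else o) o
      else o) o) []
  PySem.List.sorted o (fun s => s)

-- ===== PORT B =====
def custva_alt (tviti : List String) (hashtagi : List String) : List String :=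
  let acc : PySem.Set String := tviti.foldl (fun acc x =>
    if hashtagi.any (fun z => PySem.Str.isIn ("#" ++ z) x) then
      let parts := (PySem.Str.split? x ":").getD []
      (PySem.List.pyRange 1 (parts.length : Int)).foldl (fun acc i =>
        PySem.Set.add acc (PySem.Str.join ":" (PySem.List.slice parts none (some i)))) acc
    else acc) PySem.Set.empty
  PySem.List.sorted acc (fun s => s)

-- ===== PRECONDITION & SPEC =====
def Spec_custva (tviti : List String) (hashtagi : List String) (out : List String) : Prop := out = custva_alt tviti hashtagi
instance (tviti : List String) (hashtagi : List String) (out : List String) : Decidable (Spec_custva tviti hashtagi out) := by unfold Spec_custva; infer_instance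

-- ===== CLAIM (what is proved, stated in full; the proofs are below) =====
def Claim_equal_custva : Prop := ∀ (tviti : List String) (hashtagi : List String), Dom_custva tviti hashtagi → Spec_custva tviti hashtagi (custva tviti hashtagi)

-- ===== LEMMAS AND PROOFS =====

-- Reference form of Python's  s.split(":")  on character lists (singleton separator).
def spl (x : Char) : List Char → List (List Char)
  | [] => [[]]
  | c :: cs => if c = x then [] :: spl x cs else (spl x cs).modifyHead (c :: ·)

theorem spl_ne_nil (x : Char) (cs : List Char) : spl x cs ≠ [] := by
  induction cs with
  | nil => simp [spl]
  | cons c cs ih =>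
    simp only [spl]
    split_ifs
    · simp
    · cases h : spl x cs with
      | nil => exact absurd h ih
      | cons p t => simp

theorem go_spec (x : Char) (fuel : Nat) (l cur : List Char) (acc : List (List Char))
    (h : l.length < fuel) :
    PySem.Chars.splitOn.go [x] fuel l cur acc
      = acc.reverse ++ (spl x l).modifyHead (cur.reverse ++ ·) := by
  induction fuel generalizing l cur acc with
  | zero => omega
  | succ fuel ih =>
    cases l with
    | nil =>
      simp [PySem.Chars.splitOn.go, spl]
    | cons c rest =>
      rw [PySem.Chars.splitOn.go]
      by_cases hc : c = x
      · subst hc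
        have hp : List.isPrefixOf [c] (c :: rest) = true := by simp [List.isPrefixOf]
        rw [if_pos hp]
        rw [ih _ _ _ (by simpa using Nat.lt_of_succ_lt_succ h)]
        simp only [spl, List.reverse_cons, List.append_assoc,
          List.nil_append, List.singleton_append, List.length_singleton,
          List.drop_succ_cons, List.drop_zero, List.reverse_nil]
        cases hs : spl c rest with
        | nil => exact absurd hs (spl_ne_nil c rest)
        | cons p t => simp
      · have hp : List.isPrefixOf [x] (c :: rest) = false := by
          simp [List.isPrefixOf]; exact fun hh => (hc hh.symm).elim
        rw [if_neg (by simp [hp])]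
        rw [ih _ _ _ (by simpa using Nat.lt_of_succ_lt_succ h)]
        simp only [spl, if_neg hc]
        cases hs : spl x rest with
        | nil => exact absurd hs (spl_ne_nil x rest)
        | cons p t => simp

theorem splitOn_singleton (x : Char) (cs : List Char) :
    PySem.Chars.splitOn cs [x] = spl x cs := by
  rw [PySem.Chars.splitOn, go_spec x (cs.length + 1) cs [] [] (by omega)]
  cases h : spl x cs with
  | nil => exact absurd h (spl_ne_nil x cs)
  | cons p t => simp

theorem join_modifyHead_cons (c : Char) (sep : List Char) (ps : List (List Char)) (h : ps ≠ []) :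
    PySem.Chars.join sep (ps.modifyHead (c :: ·)) = c :: PySem.Chars.join sep ps := by
  cases ps with
  | nil => exact absurd rfl h
  | cons p t =>
    cases t with
    | nil => simp [PySem.Chars.join, List.intercalate]
    | cons q r => simp only [List.modifyHead_cons, PySem.Chars.join_cons_cons]; simp

theorem take_succ_modifyHead {α : Type} (f : α → α) (l : List α) (n : Nat) :
    (l.modifyHead f).take (n + 1) = (l.take (n + 1)).modifyHead f := by
  cases l <;> simp

theorem step_filter_map (c : Char) (cs : List Char) :
    ((List.range (cs.length + 1)).filter (fun k => (c :: cs)[k]? = some ':')).map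
        (fun k => (c :: cs).take k)
      = (if c = ':' then [[]] else [])
          ++ (((List.range cs.length).filter (fun k => cs[k]? = some ':')).map
                (fun k => cs.take k)).map (fun p => c :: p) := by
  rw [List.range_succ_eq_map, List.filter_cons]
  simp only [List.getElem?_cons_zero, Option.some.injEq, decide_eq_true_eq]
  have htail :
      ((List.map Nat.succ (List.range cs.length)).filter
          (fun k => decide ((c :: cs)[k]? = some ':'))).map (fun k => (c :: cs).take k)
        = (((List.range cs.length).filter (fun k => cs[k]? = some ':')).map
              (fun k => cs.take k)).map (fun p => c :: p) := by
    rw [List.filter_map, List.map_map, List.map_map]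
    rw [List.filter_congr (q := fun k => decide (cs[k]? = some ':'))
        (by intro k hk; simp [Function.comp])]
    apply List.map_congr_left
    intro k hk
    simp [Function.comp]
  split_ifs with hc
  · subst hc
    rw [List.map_cons, htail]
    simp
  · rw [htail]
    simp

theorem prefixes_eq (cs : List Char) :
    ((List.range cs.length).filter (fun k => cs[k]? = some ':')).map (fun k => cs.take k)
      = (List.range ((spl ':' cs).length - 1)).map
          (fun i => PySem.Chars.join [':'] ((spl ':' cs).take (i + 1))) := by
  induction cs with
  | nil => simp [spl]
  | cons c cs ih =>
    rw [List.length_cons, step_filter_map, ih]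
    obtain ⟨P, hP⟩ : ∃ P, spl ':' cs = P := ⟨_, rfl⟩
    rw [hP]
    have hPn : P ≠ [] := hP ▸ spl_ne_nil ':' cs
    by_cases hc : c = ':'
    · subst hc
      rw [if_pos rfl]
      have hsp : spl ':' (':' :: cs) = [] :: P := by rw [spl, if_pos rfl, hP]
      rw [hsp]
      obtain ⟨m, hm⟩ : ∃ m, P.length = m + 1 := by
        cases P with | nil => exact absurd rfl hPn | cons a b => exact ⟨b.length, by simp⟩
      rw [List.length_cons, hm, Nat.add_sub_cancel, Nat.add_sub_cancel,
        List.range_succ_eq_map, List.map_cons]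
      rw [List.singleton_append]
      apply List.cons_eq_cons.mpr
      constructor
      · simp [PySem.Chars.join, List.intercalate]
      · rw [List.map_map, List.map_map]
        apply List.map_congr_left
        intro i hi
        simp only [Function.comp, Nat.succ_eq_add_one, List.take_succ_cons]
        cases hPt : P.take (i + 1) with
        | nil =>
          rcases List.take_eq_nil_iff.mp hPt with h1 | h1
          · exact absurd h1 (Nat.succ_ne_zero i)
          · exact absurd h1 hPn
        | cons a b => rw [PySem.Chars.join_cons_cons]; simp
    · rw [if_neg hc]
      have hsp : spl ':' (c :: cs) = P.modifyHead (c :: ·) := by rw [spl, if_neg hc, hP]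
      rw [hsp, List.nil_append, List.length_modifyHead, List.map_map]
      apply List.map_congr_left
      intro i hi
      simp only [Function.comp]
      rw [take_succ_modifyHead, join_modifyHead_cons]
      intro hh
      rw [List.take_eq_nil_iff] at hh
      simp at hi
      rcases hh with h1 | h1
      · omega
      · exact hPn h1

-- ----- dedup-add fold machinery -----

theorem foldl_add_of_subset (L : List String) (s : PySem.Set String)
    (h : ∀ a ∈ L, a ∈ s) : L.foldl PySem.Set.add s = s := by
  induction L generalizing s with
  | nil => rfl
  | cons a t ih =>
    rw [List.foldl_cons, PySem.Set.add_of_mem (h a (by simp))]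
    exact ih s (fun b hb => h b (by simp [hb]))

theorem mem_foldl_add_mono (L : List String) (s : PySem.Set String) (a : String)
    (h : a ∈ s) : a ∈ L.foldl PySem.Set.add s := by
  induction L generalizing s with
  | nil => exact h
  | cons b t ih =>
    rw [List.foldl_cons]
    exact ih _ ((PySem.Set.mem_add s b a).mpr (Or.inl h))

theorem mem_foldl_add_of_mem (L : List String) (s : PySem.Set String) (a : String)
    (h : a ∈ L) : a ∈ L.foldl PySem.Set.add s := by
  induction L generalizing s with
  | nil => simp at h
  | cons b t ih =>
    rw [List.foldl_cons]
    rcases List.mem_cons.mp h with h | h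
    · exact mem_foldl_add_mono t _ a ((PySem.Set.mem_add s b a).mpr (Or.inr h))
    · exact ih _ h

theorem foldl_add_idem (L : List String) (s : PySem.Set String) :
    L.foldl PySem.Set.add (L.foldl PySem.Set.add s) = L.foldl PySem.Set.add s :=
  foldl_add_of_subset L _ (fun a ha => mem_foldl_add_of_mem L s a ha)

theorem foldl_cond_stay {α β : Type} (p : α → Bool) (F : β → β) (t : List α) (s : β)
    (hs : F s = s) : t.foldl (fun u z => if p z then F u else u) s = s := by
  induction t with
  | nil => rfl
  | cons z r ih =>
    rw [List.foldl_cons]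
    by_cases hz : p z = true
    · rw [if_pos hz, hs]; exact ih
    · rw [if_neg hz]; exact ih

theorem foldl_cond_eq_ite {α β : Type} (p : α → Bool) (F : β → β)
    (hF : ∀ u, F (F u) = F u) (t : List α) (s : β) :
    t.foldl (fun u z => if p z then F u else u) s = if t.any p then F s else s := by
  induction t generalizing s with
  | nil => simp
  | cons z r ih =>
    rw [List.foldl_cons, List.any_cons]
    by_cases hz : p z = true
    · rw [if_pos hz, hz]
      simp only [Bool.true_or, if_true]
      exact foldl_cond_stay p F r (F s) (hF s)
    · rw [if_neg hz, ih]
      simp only [Bool.not_eq_true] at hz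
      rw [hz]
      simp

-- ----- per-tweet prefix lists -----

-- the colon-prefixes A collects for a tweet x, in index order
def prefL (x : String) : List String :=
  ((List.range x.toList.length).filter (fun k => x.toList[k]? = some ':')).map
    (fun (k : Nat) => PySem.Str.slice x none (some (k : Int)))

theorem add_eq_mem_ite (s : PySem.Set String) (a : String) :
    (if a ∈ s then s else s ++ [a]) = PySem.Set.add s a := by
  by_cases h : a ∈ s
  · rw [if_pos h, PySem.Set.add_of_mem h]
  · rw [if_neg h, PySem.Set.add_of_not_mem h]

theorem innerA_fold (x : String) (o : PySem.Set String) :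
    (PySem.List.pyRange 0 (PySem.Str.len x)).foldl (fun o y =>
        if PySem.Str.pyGet? x y = some ':' then
          (if PySem.Str.slice x none (some y) ∈ o then o
           else o ++ [PySem.Str.slice x none (some y)])
        else o) o
      = (prefL x).foldl PySem.Set.add o := by
  rw [PySem.Str.len_eq, PySem.List.pyRange_zero_natCast, List.foldl_map]
  have hbody : ∀ (o : PySem.Set String) (k : Nat),
      (if PySem.Str.pyGet? x (k : Int) = some ':' then
        (if PySem.Str.slice x none (some (k : Int)) ∈ o then o
         else o ++ [PySem.Str.slice x none (some (k : Int))])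
       else o)
      = (if x.toList[k]? = some ':' then
          PySem.Set.add o (PySem.Str.slice x none (some (k : Int))) else o) := by
    intro o k
    rw [add_eq_mem_ite, PySem.Str.pyGet?_natCast]
  simp only [hbody]
  rw [PySem.List.foldl_ite_eq_foldl_filter (p := fun (k : Nat) => x.toList[k]? = some ':')
    (f := fun (o : PySem.Set String) (k : Nat) =>
      PySem.Set.add o (PySem.Str.slice x none (some (k : Int))))]
  rw [prefL, List.foldl_map]

theorem split_colon (x : String) :
    ∃ ps, PySem.Str.split? x ":" = some ps ∧ ps.map String.toList = spl ':' x.toList := by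
  have h2 := PySem.Str.split?_map x ":"
  have h3 : PySem.Chars.split? x.toList [':'] = some (PySem.Chars.splitOn x.toList [':']) := by
    rw [PySem.Chars.split?]; simp
  rw [show (":" : String).toList = [':'] from rfl, h3] at h2
  cases h : PySem.Str.split? x ":" with
  | none => rw [h] at h2; simp at h2
  | some ps =>
    refine ⟨ps, rfl, ?_⟩
    rw [h] at h2
    simpa [splitOn_singleton] using h2

theorem length_pos_of_split (x : String) (ps : List String)
    (hmap : ps.map String.toList = spl ':' x.toList) : ∃ m, ps.length = m + 1 := by
  have h4 : ps.length = (spl ':' x.toList).length := by rw [← hmap, List.length_map]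
  cases hq : spl ':' x.toList with
  | nil => exact absurd hq (spl_ne_nil ':' x.toList)
  | cons a b => exact ⟨b.length, by rw [h4, hq]; simp⟩

theorem pyRange_one_natCast (m : Nat) :
    PySem.List.pyRange 1 ((m + 1 : Nat) : Int)
      = (List.range m).map (fun (k : Nat) => ((k : Int) + 1)) := by
  rw [PySem.List.pyRange_of_pos _ _ Int.one_pos]
  cases m with
  | zero => simp
  | succ n =>
    have hlt : (1 : Int) < ((n + 1 + 1 : Nat) : Int) := by push_cast; omega
    rw [if_pos hlt]
    have harg : ((((n + 1 + 1 : Nat) : Int) - 1 + 1 - 1) / 1).toNat = n + 1 := by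
      push_cast; omega
    rw [harg]
    apply List.map_congr_left
    intro k hk
    ring

theorem innerB_fold (x : String) (o : PySem.Set String) (ps : List String)
    (hmap : ps.map String.toList = spl ':' x.toList) :
    (PySem.List.pyRange 1 (ps.length : Int)).foldl (fun acc i =>
        PySem.Set.add acc (PySem.Str.join ":" (PySem.List.slice ps none (some i)))) o
      = ((List.range (ps.length - 1)).map
          (fun i => PySem.Str.join ":" (ps.take (i + 1)))).foldl PySem.Set.add o := by
  obtain ⟨m, hm⟩ := length_pos_of_split x ps hmap
  rw [hm, Nat.add_sub_cancel, pyRange_one_natCast, List.foldl_map, List.foldl_map]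
  apply PySem.List.foldl_congr_mem
  intro acc k hk
  congr 1
  rw [PySem.List.slice_to ps (b := ((k : Int) + 1)) (by omega)]
  have ht : ((k : Int) + 1).toNat = k + 1 := by omega
  rw [ht]

theorem prefL_eq (x : String) (ps : List String)
    (hmap : ps.map String.toList = spl ':' x.toList) :
    prefL x = (List.range (ps.length - 1)).map (fun i => PySem.Str.join ":" (ps.take (i + 1))) := by
  have hinj : ∀ (u v : List String), u.map String.toList = v.map String.toList → u = v :=
    fun u v h => List.map_injective_iff.mpr (fun a b hab => String.toList_inj.mp hab) h
  apply hinj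
  rw [prefL, List.map_map, List.map_map]
  have hlen : ps.length = (spl ':' x.toList).length := by rw [← hmap, List.length_map]
  have hL : (fun (k : Nat) => String.toList (PySem.Str.slice x none (some (k : Int))))
      = fun (k : Nat) => x.toList.take k := by
    funext k
    rw [PySem.Str.toList_slice, PySem.Chars.slice_eq_listSlice,
      PySem.List.slice_to x.toList (b := (k : Int)) (by omega), Int.toNat_natCast]
  have hR : ((fun p => String.toList p) ∘ fun i => PySem.Str.join ":" (ps.take (i + 1)))
      = fun (i : Nat) => PySem.Chars.join [':'] ((spl ':' x.toList).take (i + 1)) := by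
    funext i
    simp only [Function.comp]
    rw [PySem.Str.toList_join, List.map_take, hmap]
    rfl
  rw [hR, hlen]
  calc List.map (fun (k : Nat) => String.toList (PySem.Str.slice x none (some (k : Int))))
        ((List.range x.toList.length).filter (fun k => x.toList[k]? = some ':'))
      = List.map (fun (k : Nat) => x.toList.take k)
        ((List.range x.toList.length).filter (fun k => x.toList[k]? = some ':')) := by rw [hL]
    _ = _ := prefixes_eq x.toList

-- ===== VERDICT (by name: the statement is the Claim_ definition above) =====
theorem custva_spec : Claim_equal_custva := by
  intro tviti hashtagi _
  unfold Spec_custva custva custva_alt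
  refine congrArg (fun l => PySem.List.sorted l (fun s => s)) ?_
  refine congrArg (fun f => List.foldl f ([] : List String) tviti) ?_
  funext o x
  obtain ⟨ps, hps, hmap⟩ := split_colon x
  have hA : ∀ (o : PySem.Set String),
      (PySem.List.pyRange 0 (PySem.Str.len x)).foldl (fun o y =>
        if PySem.Str.pyGet? x y = some ':' then
          (if PySem.Str.slice x none (some y) ∈ o then o
           else o ++ [PySem.Str.slice x none (some y)])
        else o) o = (prefL x).foldl PySem.Set.add o := innerA_fold x
  calc hashtagi.foldl (fun o z =>
        if PySem.Str.isIn ("#" ++ z) x then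
          (PySem.List.pyRange 0 (PySem.Str.len x)).foldl (fun o y =>
            if PySem.Str.pyGet? x y = some ':' then
              (if PySem.Str.slice x none (some y) ∈ o then o
               else o ++ [PySem.Str.slice x none (some y)])
            else o) o
        else o) o
      = hashtagi.foldl (fun o z =>
          if PySem.Str.isIn ("#" ++ z) x then (prefL x).foldl PySem.Set.add o else o) o := by
        apply PySem.List.foldl_congr_mem
        intro acc z _
        by_cases hz : PySem.Str.isIn ("#" ++ z) x = true
        · rw [if_pos hz, if_pos hz, hA]
        · rw [if_neg hz, if_neg hz]
    _ = if hashtagi.any (fun z => PySem.Str.isIn ("#" ++ z) x) then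
          (prefL x).foldl PySem.Set.add o else o :=
        foldl_cond_eq_ite _ _ (fun u => foldl_add_idem (prefL x) u) hashtagi o
    _ = _ := by
        by_cases hany : hashtagi.any (fun z => PySem.Str.isIn ("#" ++ z) x) = true
        · rw [if_pos hany, if_pos hany, hps]
          simp only [Option.getD_some]
          rw [innerB_fold x o ps hmap, prefL_eq x ps hmap]
        · rw [if_neg hany, if_neg hany]
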